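-- pv_equiv track=rewrite | github.com/luuismrtn/Advent-Of-Code-42-2024 | day9/day9+.py | find_last_num
-- ===== SOURCE A (Python) =====
-- def find_last_num(visual_disk, i):
--     while i >= 0 and visual_disk[i] == ".":
--         i -= 1
--
--     if i < 0:
--         return None, None, None
--
--     num = visual_disk[i]
--     length = 0
--
--     while i >= 0 and visual_disk[i] == num:
--         i -= 1
--         length += 1
--
--     return num, i, length
-- ===== SOURCE B (Python) =====
-- def find_last_num(visual_disk, i):
--     prefix = visual_disk[: i + 1] if i >= 0 else []
--     m = len(prefix)
--     best = (None, None, None)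
--     j = 0
--     while j < m:
--         head = prefix[j]
--         run = 1
--         while j + run < m and prefix[j + run] == head:
--             run += 1
--         if head != ".":
--             best = (head, j - 1, run)
--         j += run
--     return best
-- ===== Notes on version B (the rewrite author's own statement) =====
-- stated objective: alternative
-- what changed: A scans backward from i twice (skip dots, then count the run); B makes one forward pass over the prefix visual_disk[:i+1], grouping it into runs and keeping the last run whose element is not '.', returning (element, start-1, run length).
import Mathlib
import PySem

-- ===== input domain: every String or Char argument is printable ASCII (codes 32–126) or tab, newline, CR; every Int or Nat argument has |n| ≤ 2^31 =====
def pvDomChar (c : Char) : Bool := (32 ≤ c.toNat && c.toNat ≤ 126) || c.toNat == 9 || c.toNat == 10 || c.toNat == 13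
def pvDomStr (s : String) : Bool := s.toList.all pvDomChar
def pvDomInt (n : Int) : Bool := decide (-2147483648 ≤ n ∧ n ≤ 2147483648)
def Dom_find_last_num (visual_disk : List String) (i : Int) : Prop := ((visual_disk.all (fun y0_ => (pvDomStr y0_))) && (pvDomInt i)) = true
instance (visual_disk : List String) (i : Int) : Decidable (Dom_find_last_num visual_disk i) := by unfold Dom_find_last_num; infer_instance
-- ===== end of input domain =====

-- B replaces A's two backward index scans by a single forward pass that walks the prefix
-- run by run and keeps the last non-dot run (objective: alternative, not faster).

-- ===== PORT A =====
-- first while loop: skip dots from i downward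
def find_last_num_go1 (visual_disk : List String) (i : Int) : Int :=
  if h : 0 ≤ i ∧ PySem.List.pyGet? visual_disk i = some "." then
    find_last_num_go1 visual_disk (i - 1)
  else i
termination_by (i + 1).toNat
decreasing_by obtain ⟨h1, -⟩ := h; omega

-- second while loop: count the run of `num` downward
def find_last_num_go2 (visual_disk : List String) (num : String) (i : Int) (length : Int) : Int × Int :=
  if h : 0 ≤ i ∧ PySem.List.pyGet? visual_disk i = some num then
    find_last_num_go2 visual_disk num (i - 1) (length + 1)
  else (i, length)
termination_by (i + 1).toNat
decreasing_by obtain ⟨h1, -⟩ := h; omega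

def find_last_num (visual_disk : List String) (i : Int) : Option String × Option Int × Option Int :=
  let i1 := find_last_num_go1 visual_disk i
  if i1 < 0 then (none, none, none)
  else
    match PySem.List.pyGet? visual_disk i1 with
    | none => (none, none, none)  -- unreachable under Pre_ (in Python the first loop would already have raised IndexError)
    | some num =>
      let p := find_last_num_go2 visual_disk num i1 0
      (some num, some p.1, some p.2)

-- ===== PORT B =====
-- inner while loop of Source B: run = 1; while run < len(rest) and rest[run] == head: run += 1
-- (counted as 1 + leading elements of the tail equal to head)
def find_last_num_runLen (head : String) : List String → Nat
  | [] => 0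
  | x :: xs => if x = head then find_last_num_runLen head xs + 1 else 0

-- outer while loop of Source B, over the index j; `prefix[j]` is ported as getD (j < m keeps it in
-- range, so the default is never read); the inner while loop is find_last_num_runLen over the
-- elements after j; fuel = prefix.length steps always suffice (j grows by run ≥ 1 each step)
def find_last_num_altLoop (fuel : Nat) (pfx : List String) (j : Nat)
    (best : Option String × Option Int × Option Int) : Option String × Option Int × Option Int :=
  match fuel with
  | 0 => best
  | fuel + 1 =>
    if j < pfx.length then
      let head := pfx.getD j ""
      let run : Nat := 1 + find_last_num_runLen head (pfx.drop (j + 1))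
      let best' := if head ≠ "." then (some head, some ((j : Int) - 1), some (run : Int)) else best
      find_last_num_altLoop fuel pfx (j + run) best'
    else best

def find_last_num_alt (visual_disk : List String) (i : Int) : Option String × Option Int × Option Int :=
  let pfx := if 0 ≤ i then PySem.List.slice visual_disk none (some (i + 1)) else []
  find_last_num_altLoop pfx.length pfx 0 (none, none, none)

-- ===== PRECONDITION & SPEC =====
-- Pre_ excludes i ≥ len(visual_disk), on which Python A raises IndexError at visual_disk[i].
def Pre_find_last_num (visual_disk : List String) (i : Int) : Prop :=
  i < (visual_disk.length : Int)
instance (visual_disk : List String) (i : Int) : Decidable (Pre_find_last_num visual_disk i) := by unfold Pre_find_last_num; infer_instance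

def pvWitness_find_last_num : List String × Int := (["1", "1", ".", "2"], 3)

def Spec_find_last_num (visual_disk : List String) (i : Int) (out : Option String × Option Int × Option Int) : Prop := out = find_last_num_alt visual_disk i
instance (visual_disk : List String) (i : Int) (out : Option String × Option Int × Option Int) : Decidable (Spec_find_last_num visual_disk i out) := by unfold Spec_find_last_num; infer_instance

-- ===== CLAIM (what is proved, stated in full; the proofs are below) =====
def Claim_equal_find_last_num : Prop := ∀ (visual_disk : List String) (i : Int), Dom_find_last_num visual_disk i → Pre_find_last_num visual_disk i → Spec_find_last_num visual_disk i (find_last_num visual_disk i)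

-- ===== LEMMAS AND PROOFS =====

theorem runLen_le_length (h : String) (l : List String) :
    find_last_num_runLen h l ≤ l.length := by
  induction l with
  | nil => simp [find_last_num_runLen]
  | cons x xs ih =>
    simp only [find_last_num_runLen, List.length_cons]
    split
    · omega
    · omega

theorem runLen_decomp (h : String) (l : List String) :
    List.replicate (find_last_num_runLen h l) h ++ l.drop (find_last_num_runLen h l) = l := by
  induction l with
  | nil => simp [find_last_num_runLen]
  | cons x xs ih =>
    simp only [find_last_num_runLen]
    split
    · next hx => simp [List.replicate_succ, hx, ih]
    · simp

theorem runLen_drop_head (h : String) (l : List String) :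
    (l.drop (find_last_num_runLen h l)).head? ≠ some h := by
  induction l with
  | nil => simp [find_last_num_runLen]
  | cons x xs ih =>
    simp only [find_last_num_runLen]
    split
    · simpa using ih
    · next hx => simpa using hx

theorem runLen_replicate (h : String) (n : Nat) :
    find_last_num_runLen h (List.replicate n h) = n := by
  induction n with
  | zero => simp [find_last_num_runLen]
  | succ k ih => simp [List.replicate_succ, find_last_num_runLen, ih]

theorem runLen_append (h : String) (l1 l2 : List String) :
    find_last_num_runLen h (l1 ++ l2) =
      if find_last_num_runLen h l1 < l1.length then find_last_num_runLen h l1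
      else find_last_num_runLen h l1 + find_last_num_runLen h l2 := by
  induction l1 with
  | nil => simp [find_last_num_runLen]
  | cons x xs ih =>
    have hle := runLen_le_length h xs
    by_cases hx : x = h
    · simp only [List.cons_append, find_last_num_runLen, if_pos hx, ih, List.length_cons]
      split
      · split
        · rfl
        · omega
      · split
        · omega
        · omega
    · simp [find_last_num_runLen, hx]

theorem runLen_eq_length_all (h : String) (l : List String)
    (he : find_last_num_runLen h l = l.length) : ∀ x ∈ l, x = h := by
  induction l with
  | nil => simp
  | cons x xs ih =>
    simp only [find_last_num_runLen] at he
    split at he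
    · next hx =>
      intro y hy
      rcases List.mem_cons.mp hy with rfl | hy
      · exact hx
      · exact ih (by simpa using he) y hy
    · have := runLen_le_length h xs
      simp only [List.length_cons] at he
      omega

theorem dropWhile_replicate_pos (p : String → Bool) (n : Nat) (a : String) (hp : p a = true) :
    (List.replicate n a).dropWhile p = [] := by
  induction n with
  | zero => simp
  | succ k ih => simp [List.replicate_succ, hp, ih]

-- proof-view of B's loop: the suffix prefix[j:] together with its global position
def find_last_num_altRuns (fuel : Nat) (rest : List String) (pos : Int)
    (best : Option String × Option Int × Option Int) : Option String × Option Int × Option Int :=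
  match fuel, rest with
  | 0, _ => best
  | _, [] => best
  | fuel + 1, head :: tl =>
    let run : Nat := 1 + find_last_num_runLen head tl
    let best' := if head ≠ "." then (some head, some (pos - 1), some (run : Int)) else best
    find_last_num_altRuns fuel (tl.drop (find_last_num_runLen head tl)) (pos + run) best'

-- the index loop is the run recursion on the suffix pfx[j:]
theorem altLoop_eq_altRuns (fuel : Nat) (pfx : List String) (j : Nat)
    (best : Option String × Option Int × Option Int) :
    find_last_num_altLoop fuel pfx j best =
      find_last_num_altRuns fuel (pfx.drop j) (j : Int) best := by
  induction fuel generalizing j best with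
  | zero => rfl
  | succ fuel ih =>
    by_cases hj : j < pfx.length
    · have hdrop : pfx.drop j = pfx[j] :: pfx.drop (j + 1) := List.drop_eq_getElem_cons hj
      have hgetD : pfx.getD j "" = pfx[j] := List.getD_eq_getElem _ _ hj
      have hL : find_last_num_altLoop (fuel + 1) pfx j best =
          find_last_num_altLoop fuel pfx (j + (1 + find_last_num_runLen (pfx.getD j "") (pfx.drop (j + 1))))
            (if pfx.getD j "" ≠ "." then
              (some (pfx.getD j ""), some ((j : Int) - 1),
               some ((1 + find_last_num_runLen (pfx.getD j "") (pfx.drop (j + 1)) : Nat) : Int))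
             else best) := by
        rw [find_last_num_altLoop, if_pos hj]
      rw [hL, ih, hgetD, hdrop, find_last_num_altRuns]
      rw [List.drop_drop]
      have e1 : j + (1 + find_last_num_runLen pfx[j] (pfx.drop (j + 1))) =
          find_last_num_runLen pfx[j] (pfx.drop (j + 1)) + (j + 1) := by omega
      rw [e1]
      have e2 : ((find_last_num_runLen pfx[j] (pfx.drop (j + 1)) + (j + 1) : Nat) : Int) =
          (j : Int) + ((1 + find_last_num_runLen pfx[j] (pfx.drop (j + 1)) : Nat) : Int) := by
        push_cast; ring
      rw [e2]
      have e3 : find_last_num_runLen pfx[j] (pfx.drop (j + 1)) + (j + 1) =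
          j + 1 + find_last_num_runLen pfx[j] (pfx.drop (j + 1)) := by omega
      rw [e3]
    · have hdrop : pfx.drop j = [] := List.drop_eq_nil_of_le (by omega)
      rw [find_last_num_altLoop, if_neg hj, hdrop]
      rfl

-- characterization of the run recursion: the last non-dot run of `rest`
theorem altLoop_eq (fuel : Nat) (rest : List String) (pos : Int) (best : Option String × Option Int × Option Int)
    (hf : rest.length ≤ fuel) :
    find_last_num_altRuns fuel rest pos best =
      (let r := rest.reverse.dropWhile (fun s => s == ".");
       if r.isEmpty then best
       else (some r.headI,
             some (pos + (r.length : Int) - (find_last_num_runLen r.headI r : Int) - 1),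
             some ((find_last_num_runLen r.headI r : Int)))) := by
  induction fuel generalizing rest pos best with
  | zero =>
    have : rest = [] := List.eq_nil_of_length_eq_zero (by omega)
    subst this
    simp [find_last_num_altRuns]
  | succ fuel ih =>
    match rest with
    | [] => simp [find_last_num_altRuns]
    | head :: tl =>
      set k := find_last_num_runLen head tl with hk
      set rest' := tl.drop k with hrest'
      have hkle : k ≤ tl.length := runLen_le_length head tl
      have hL : find_last_num_altRuns (fuel + 1) (head :: tl) pos best =
          find_last_num_altRuns fuel rest' (pos + (1 + k : Nat))
            (if head ≠ "." then (some head, some (pos - 1), some ((1 + k : Nat) : Int)) else best) := rfl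
      have hfl : rest'.length ≤ fuel := by
        simp only [hrest', List.length_drop]
        simp only [List.length_cons] at hf
        omega
      rw [hL, ih rest' _ _ hfl]
      -- decomposition: head :: tl = replicate (k+1) head ++ rest'
      have hdecomp : head :: tl = List.replicate (k + 1) head ++ rest' := by
        rw [List.replicate_succ]
        simp only [List.cons_append]
        rw [hrest', hk, runLen_decomp head tl]
      have hrev : (head :: tl).reverse = rest'.reverse ++ List.replicate (k + 1) head := by
        rw [hdecomp, List.reverse_append, List.reverse_replicate]
      set r' := rest'.reverse.dropWhile (fun s => s == ".") with hr'
      by_cases hr'e : r'.isEmpty = true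
      · -- no non-dot run after this one
        rw [if_pos hr'e]
        have hr'nil : r' = [] := List.isEmpty_iff.mp hr'e
        have hrdw : (head :: tl).reverse.dropWhile (fun s => s == ".") =
            (List.replicate (k + 1) head).dropWhile (fun s => s == ".") := by
          rw [hrev, List.dropWhile_append, ← hr', hr'nil]
          simp
        by_cases hdot : head = "."
        · have hempty : (List.replicate (k + 1) head).dropWhile (fun s => s == ".") = [] :=
            dropWhile_replicate_pos _ _ _ (by simp [hdot])
          rw [hrdw, hempty]
          simp [hdot]
        · have hph : (head == ".") = false := by simp [hdot]
          have hkeep : (List.replicate (k + 1) head).dropWhile (fun s => s == ".") =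
              List.replicate (k + 1) head := by
            rw [List.replicate_succ, List.dropWhile_cons, hph]
            simp [← List.replicate_succ]
          rw [hrdw, hkeep, if_pos hdot]
          have hhead : (List.replicate (k + 1) head).headI = head := by
            simp [List.replicate_succ]
          have hne : ¬ (List.replicate (k + 1) head).isEmpty = true := by simp
          rw [if_neg hne]
          simp only [hhead, runLen_replicate, List.length_replicate, Prod.mk.injEq]
          refine ⟨trivial, by congr 1; push_cast; ring, by congr 1; push_cast; ring⟩
      · -- a non-dot run exists later: the recursive answer wins
        rw [if_neg hr'e]
        have hr'ne : r' ≠ [] := fun h => hr'e (by simp [h])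
        obtain ⟨h', t', hr'c⟩ := List.exists_cons_of_ne_nil hr'ne
        have hrdw : (head :: tl).reverse.dropWhile (fun s => s == ".") =
            r' ++ List.replicate (k + 1) head := by
          rw [hrev, List.dropWhile_append, ← hr']
          simp [hr'e]
        have hrn : find_last_num_runLen (r'.headI) (r' ++ List.replicate (k + 1) head) =
            find_last_num_runLen (r'.headI) r' := by
          rw [runLen_append]
          split
          · rfl
          · -- runLen r'.headI r' = r'.length: every element of r' is r'.headI, so rest' would start with it
            next hge =>
            have heq : find_last_num_runLen (r'.headI) r' = r'.length := by
              have := runLen_le_length (r'.headI) r'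
              omega
            have hall : ∀ x ∈ r', x = r'.headI := runLen_eq_length_all _ _ heq
            have hrevne : r'.reverse ≠ [] := by simp [hr'ne]
            obtain ⟨y, ys, hys⟩ := List.exists_cons_of_ne_nil hrevne
            have hy : y = r'.headI := by
              refine hall y ?_
              have : y ∈ r'.reverse := by rw [hys]; simp
              simpa using this
            have hhead : rest'.head? = some r'.headI := by
              have hsplit : rest'.reverse = rest'.reverse.takeWhile (fun s => s == ".") ++ r' := by
                rw [hr']; exact (List.takeWhile_append_dropWhile).symm
              have hre2 : rest' = r'.reverse ++ (rest'.reverse.takeWhile (fun s => s == ".")).reverse := by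
                have := congrArg List.reverse hsplit
                simpa [List.reverse_append] using this
              rw [hre2, List.head?_append_of_ne_nil _ (by simp [hr'ne]), hys]
              exact congrArg some hy
            have hne' : r'.headI ≠ head := by
              intro h
              exact runLen_drop_head head tl (by rw [← hrest', hhead, h])
            have hz : find_last_num_runLen (r'.headI) (List.replicate (k + 1) head) = 0 := by
              rw [List.replicate_succ]
              simp only [find_last_num_runLen]
              rw [if_neg (fun h => hne' h.symm)]
            omega
        have hhdI : (r' ++ List.replicate (k + 1) head).headI = r'.headI := by
          rw [hr'c]; rfl
        rw [hrdw]
        have hne2 : ¬ (r' ++ List.replicate (k + 1) head).isEmpty = true := by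
          simp [hr'c]
        rw [if_neg hne2]
        simp only [hhdI, hrn, List.length_append, List.length_replicate, Prod.mk.injEq]
        refine ⟨trivial, by congr 1; push_cast; ring, trivial⟩

-- characterization of A's first loop
theorem go1_eq (vd : List String) (n : Nat) (hn : n ≤ vd.length) :
    find_last_num_go1 vd ((n : Int) - 1) =
      ((((vd.take n).reverse.dropWhile (fun s => s == ".")).length : Int) - 1) := by
  induction n with
  | zero =>
    rw [find_last_num_go1]
    norm_num
  | succ m ih =>
    have hm : m < vd.length := by omega
    have htake : vd.take (m + 1) = vd.take m ++ [vd[m]] := by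
      rw [List.take_add_one]; simp [List.getElem?_eq_getElem hm]
    have hcast : ((m + 1 : Nat) : Int) - 1 = ((m : Nat) : Int) := by push_cast; ring
    have hget : PySem.List.pyGet? vd (((m + 1 : Nat) : Int) - 1) = some vd[m] := by
      rw [hcast, PySem.List.pyGet?_natCast]
      simp [List.getElem?_eq_getElem hm]
    rw [find_last_num_go1]
    by_cases hdot : vd[m] = "."
    · rw [dif_pos ⟨by push_cast; omega, by rw [hget, hdot]⟩]
      have h2 : ((m + 1 : Nat) : Int) - 1 - 1 = ((m : Nat) : Int) - 1 := by push_cast; ring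
      rw [h2, ih (by omega)]
      congr 2
      rw [htake, List.reverse_append]
      simp [hdot]
    · rw [dif_neg (by rw [hget]; simp [hdot])]
      have hlen : ((vd.take (m + 1)).reverse.dropWhile (fun s => s == ".")).length = m + 1 := by
        rw [htake, List.reverse_append]
        have hb : (vd[m] == ".") = false := by simp [hdot]
        simp [hb, List.length_take]
        omega
      rw [hlen]

-- characterization of A's second loop
theorem go2_eq (vd : List String) (num : String) (n : Nat) (c : Int) (hn : n ≤ vd.length) :
    find_last_num_go2 vd num ((n : Int) - 1) c =
      ((n : Int) - 1 - (find_last_num_runLen num (vd.take n).reverse : Int),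
       c + (find_last_num_runLen num (vd.take n).reverse : Int)) := by
  induction n generalizing c with
  | zero =>
    rw [find_last_num_go2]
    norm_num [find_last_num_runLen]
  | succ m ih =>
    have hm : m < vd.length := by omega
    have htake : vd.take (m + 1) = vd.take m ++ [vd[m]] := by
      rw [List.take_add_one]; simp [List.getElem?_eq_getElem hm]
    have hcast : ((m + 1 : Nat) : Int) - 1 = ((m : Nat) : Int) := by push_cast; ring
    have hget : PySem.List.pyGet? vd (((m + 1 : Nat) : Int) - 1) = some vd[m] := by
      rw [hcast, PySem.List.pyGet?_natCast]
      simp [List.getElem?_eq_getElem hm]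
    have hrev : (vd.take (m + 1)).reverse = vd[m] :: (vd.take m).reverse := by
      rw [htake, List.reverse_append]; rfl
    rw [find_last_num_go2]
    by_cases hnum : vd[m] = num
    · rw [dif_pos ⟨by push_cast; omega, by rw [hget, hnum]⟩]
      have h2 : ((m + 1 : Nat) : Int) - 1 - 1 = ((m : Nat) : Int) - 1 := by push_cast; ring
      rw [h2, ih (c + 1) (by omega), hrev]
      simp only [find_last_num_runLen, if_pos hnum]
      simp only [Prod.mk.injEq]
      refine ⟨by push_cast; ring, by push_cast; ring⟩
    · rw [dif_neg (by rw [hget]; simp [hnum])]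
      rw [hrev]
      simp only [find_last_num_runLen, if_neg hnum]
      norm_num

-- ===== VERDICT (by name: the statement is the Claim_ definition above) =====
theorem find_last_num_spec : Claim_equal_find_last_num := by
  unfold Claim_equal_find_last_num
  intro vd i _ hpre
  unfold Pre_find_last_num at hpre
  unfold Spec_find_last_num
  by_cases hi : 0 ≤ i
  case neg =>
    have hA : find_last_num_go1 vd i = i := by
      rw [find_last_num_go1, dif_neg (fun h => hi h.1)]
    simp only [find_last_num, find_last_num_alt, hA, if_neg hi, if_pos (by omega : i < 0)]
    simp [find_last_num_altLoop]
  case pos =>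
    set n : Nat := (i + 1).toNat with hn
    have hin : i = (n : Int) - 1 := by omega
    have hnle : n ≤ vd.length := by omega
    have hslice : PySem.List.slice vd none (some (i + 1)) = vd.take n := by
      have h1 : i + 1 = ((n : Nat) : Int) := by omega
      rw [h1, PySem.List.slice_to_natCast]
    have hPlen : (vd.take n).length = n := by simp [List.length_take]; omega
    have hBv : find_last_num_alt vd i =
        (let r := (vd.take n).reverse.dropWhile (fun s => s == ".");
         if r.isEmpty then (none, none, none)
         else (some r.headI,
               some ((0 : Int) + (r.length : Int) - (find_last_num_runLen r.headI r : Int) - 1),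
               some ((find_last_num_runLen r.headI r : Int)))) := by
      simp only [find_last_num_alt, if_pos hi, hslice]
      rw [altLoop_eq_altRuns]
      simpa using altLoop_eq (vd.take n).length (vd.take n) 0 (none, none, none) le_rfl
    set r := (vd.take n).reverse.dropWhile (fun s => s == ".") with hr
    have hLle : r.length ≤ n := by
      calc r.length ≤ (vd.take n).reverse.length := by rw [hr]; exact List.length_dropWhile_le _ _
        _ = n := by simp [hPlen]
    have hgo1 : find_last_num_go1 vd i = (r.length : Int) - 1 := by
      rw [hin]; exact go1_eq vd n hnle
    by_cases hre : r.isEmpty = true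
    · have hrnil : r = [] := List.isEmpty_iff.mp hre
      simp only [find_last_num, hgo1, hrnil]
      rw [hBv]
      simp [hrnil]
    · obtain ⟨rh, rt, hrc⟩ := List.exists_cons_of_ne_nil (show r ≠ [] from fun h => hre (by simp [h]))
      have hL1 : 1 ≤ r.length := by rw [hrc]; simp
      have htif : (vd.take n).reverse.takeWhile (fun s => s == ".") ++ r = (vd.take n).reverse := by
        rw [hr]; exact List.takeWhile_append_dropWhile
      have hPdec : vd.take n = r.reverse ++ ((vd.take n).reverse.takeWhile (fun s => s == ".")).reverse := by
        have h2 := congrArg List.reverse htif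
        simpa [List.reverse_append] using h2.symm
      have htkL : vd.take r.length = r.reverse := by
        have h1 : vd.take r.length = (vd.take n).take r.length := by
          rw [List.take_take]; congr 1; omega
        rw [h1, hPdec, List.take_append_of_le_length (by simp), List.take_of_length_le (by simp)]
      have hgetq : vd[(r.length - 1 : Nat)]? = some rh := by
        have h1 : (vd.take r.length)[(r.length - 1 : Nat)]? = vd[(r.length - 1 : Nat)]? := by
          rw [List.getElem?_take, if_pos (by omega)]
        rw [← h1, htkL, hrc, List.reverse_cons]
        have h2 : (rh :: rt).length - 1 = rt.reverse.length := by simp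
        rw [h2]
        exact List.getElem?_concat_length
      have hget : PySem.List.pyGet? vd ((r.length : Int) - 1) = some rh := by
        have h1 : (r.length : Int) - 1 = ((r.length - 1 : Nat) : Int) := by omega
        rw [h1, PySem.List.pyGet?_natCast, hgetq]
      have hgo2 := go2_eq vd rh r.length 0 (by omega)
      rw [htkL, List.reverse_reverse] at hgo2
      have hheadI : r.headI = rh := by rw [hrc]; rfl
      simp only [find_last_num, hgo1, if_neg (by omega : ¬ (r.length : Int) - 1 < 0), hget, hgo2]
      rw [hBv]
      simp only [hre, Bool.false_eq_true, if_false, hheadI, Prod.mk.injEq]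
      refine ⟨trivial, by congr 1; ring, by congr 1; ring⟩
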